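-- pv_equiv track=rewrite | github.com/Gerard003-ecu/apu_filter | tests/integration/dynamic_stress/test_mic_quantum_hilbert_integration.py | _has_any_key_fragment
-- ===== SOURCE A (Python) =====
-- from typing import (
--     Any,
--     Callable,
--     Dict,
--     FrozenSet,
--     List,
--     Mapping,
--     Optional,
--     Sequence,
--     Set,
--     Tuple,
--     Union,
-- )
--
-- def _has_any_key_fragment(
--     ctx: Mapping[str, Any],
--     fragments: FrozenSet[str],
-- ) -> bool:
--     """
--     Verifica si alguna clave del contexto contiene algún fragmento.
--
--     Busca coincidencias case-insensitive de los fragmentos dentro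
--     de las claves del contexto.
--
--     Complejidad: O(|keys| × |fragments| × L) donde L es longitud
--     promedio de las claves.
--
--     Args:
--         ctx: Contexto a inspeccionar
--         fragments: Conjunto de fragmentos a buscar
--
--     Returns:
--         bool: True si ∃ clave k tal que ∃ fragmento f: f ⊆ k (case-insensitive)
--     """
--     if not ctx or not fragments:
--         return False
--
--     lowered_keys: List[str] = [str(k).lower() for k in ctx.keys()]
--     lowered_fragments: List[str] = [f.lower() for f in fragments]
--
--     return any(
--         fragment in key
--         for key in lowered_keys
--         for fragment in lowered_fragments
--     )
-- ===== SOURCE B (Python) =====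
-- def _lc(c):
--     return chr(ord(c) + 32) if 'A' <= c <= 'Z' else c
--
-- def _is_prefix_ci(frag, key):
--     if len(frag) > len(key):
--         return False
--     for fc, kc in zip(frag, key):
--         if _lc(fc) != _lc(kc):
--             return False
--     return True
--
-- def _contains_ci(frag, key):
--     while True:
--         if _is_prefix_ci(frag, key):
--             return True
--         if not key:
--             return False
--         key = key[1:]
--
-- def _has_any_key_fragment(ctx, fragments):
--     for k in ctx:
--         key = str(k)
--         for f in fragments:
--             if _contains_ci(f, key):
--                 return True
--     return False
-- ===== Notes on version B (the rewrite author's own statement) =====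
-- stated objective: alternative
-- what changed: B never builds lowered copies of the keys or fragments: it runs a hand-written case-insensitive prefix/suffix-scan matcher character by character with early exit on the first match, instead of A's staged lowering passes followed by nested built-in substring tests.
import Mathlib
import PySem

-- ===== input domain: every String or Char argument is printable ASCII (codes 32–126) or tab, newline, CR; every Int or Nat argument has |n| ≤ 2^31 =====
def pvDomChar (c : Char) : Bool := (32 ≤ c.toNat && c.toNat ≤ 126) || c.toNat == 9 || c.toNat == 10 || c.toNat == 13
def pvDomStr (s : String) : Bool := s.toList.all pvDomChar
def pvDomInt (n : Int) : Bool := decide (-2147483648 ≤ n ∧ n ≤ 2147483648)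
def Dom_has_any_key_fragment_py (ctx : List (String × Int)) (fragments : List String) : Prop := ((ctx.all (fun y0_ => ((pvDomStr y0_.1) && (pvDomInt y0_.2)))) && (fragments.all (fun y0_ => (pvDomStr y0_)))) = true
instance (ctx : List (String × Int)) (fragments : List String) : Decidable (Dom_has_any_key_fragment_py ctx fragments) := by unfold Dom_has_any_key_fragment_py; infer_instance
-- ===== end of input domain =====

-- B replaces A's lowered-copies + nested built-in substring tests by a hand-written
-- character-level case-insensitive scan with early exit (objective: alternative
-- algorithm of the same cost; equal on the stated ASCII domain).

-- ===== PORT A =====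
def has_any_key_fragment_py (ctx : List (String × Int)) (fragments : List String) : Bool :=
  if ctx.isEmpty || fragments.isEmpty then false
  else
    let lowered_keys : List String := ctx.map (fun kv => PySem.Str.lower kv.1)
    let lowered_fragments : List String := fragments.map (fun f => PySem.Str.lower f)
    lowered_keys.any (fun key => lowered_fragments.any (fun fragment => PySem.Str.isIn fragment key))

-- ===== PORT B =====
-- per-character ASCII lowercase (Python helper _lc)
def lcChar (c : Char) : Char := if 'A' ≤ c ∧ c ≤ 'Z' then Char.ofNat (c.toNat + 32) else c

-- Python helper _is_prefix_ci: case-insensitive prefix test, char by char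
def isPrefixCI : List Char → List Char → Bool
  | [], _ => true
  | _ :: _, [] => false
  | f :: fs, k :: ks => lcChar f == lcChar k && isPrefixCI fs ks

-- Python helper _contains_ci: scan every suffix of the key for a CI prefix match
def containsCI (frag : List Char) : List Char → Bool
  | [] => isPrefixCI frag []
  | k :: ks => isPrefixCI frag (k :: ks) || containsCI frag ks

def has_any_key_fragment_py_alt (ctx : List (String × Int)) (fragments : List String) : Bool :=
  ctx.any (fun kv => fragments.any (fun f => containsCI f.toList kv.1.toList))

-- ===== PRECONDITION & SPEC =====
def Spec_has_any_key_fragment_py (ctx : List (String × Int)) (fragments : List String) (out : Bool) : Prop := out = has_any_key_fragment_py_alt ctx fragments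
instance (ctx : List (String × Int)) (fragments : List String) (out : Bool) : Decidable (Spec_has_any_key_fragment_py ctx fragments out) := by unfold Spec_has_any_key_fragment_py; infer_instance

-- ===== CLAIM =====
def Claim_equal_has_any_key_fragment_py : Prop := ∀ (ctx : List (String × Int)) (fragments : List String), Dom_has_any_key_fragment_py ctx fragments → Spec_has_any_key_fragment_py ctx fragments (has_any_key_fragment_py ctx fragments)

-- ===== LEMMAS AND PROOFS =====

-- B's per-character lowercase agrees with PySem's
lemma lcChar_eq (c : Char) : lcChar c = PySem.Chars.lowerChar c := by
  unfold lcChar PySem.Chars.lowerChar PySem.Chars.isupper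
  by_cases h : 'A' ≤ c ∧ c ≤ 'Z' <;> simp [h]

-- the CI prefix test is the prefix relation on lowered lists
lemma isPrefixCI_iff : ∀ (f k : List Char),
    isPrefixCI f k = true ↔ f.map lcChar <+: k.map lcChar := by
  intro f
  induction f with
  | nil => intro k; simp [isPrefixCI]
  | cons c fs ih =>
    intro k
    cases k with
    | nil => simp [isPrefixCI]
    | cons d ks =>
      simp [isPrefixCI, List.cons_prefix_cons, ih ks]

-- the CI scan is the infix relation on lowered lists
lemma containsCI_iff : ∀ (f k : List Char),
    containsCI f k = true ↔ f.map lcChar <:+: k.map lcChar := by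
  intro f k
  induction k with
  | nil => simp [containsCI, isPrefixCI_iff, List.infix_nil, List.prefix_nil]
  | cons d ks ih =>
    simp [containsCI, isPrefixCI_iff, ih, List.map_cons, List.infix_cons_iff]

-- pointwise: the CI scan equals A's lowered substring test
lemma containsCI_eq_isIn (f k : String) :
    containsCI f.toList k.toList = PySem.Str.isIn (PySem.Str.lower f) (PySem.Str.lower k) := by
  rw [Bool.eq_iff_iff, containsCI_iff, PySem.Str.isIn_iff_infix,
    PySem.Str.toList_lower, PySem.Str.toList_lower]
  simp [PySem.Chars.lower, List.map_congr_left (fun c _ => lcChar_eq c)]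

theorem has_any_key_fragment_py_spec : Claim_equal_has_any_key_fragment_py := by
  intro ctx fragments _
  unfold Spec_has_any_key_fragment_py has_any_key_fragment_py has_any_key_fragment_py_alt
  cases hemp : (ctx.isEmpty || fragments.isEmpty) with
  | true =>
    rcases Bool.or_eq_true_iff.mp hemp with h | h <;>
      simp_all [List.isEmpty_iff]
  | false =>
    simp only [Bool.false_eq_true, if_false, List.any_map, containsCI_eq_isIn, Function.comp_def]
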